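-- pv_equiv track=rewrite | github.com/coding-frog117/Programmers | 프로그래머스/2/17687. ［3차］ n진수 게임/［3차］ n진수 게임.py | solution
-- ===== SOURCE A (Python) =====
-- def solution(n, t, m, p):
--     count = 0
--     finish = 0
--     num = 1
--     answer= '0'
--
--     invertAlpha = {10:'A',11:'B',12:'C',13:'D',14:'E',15:'F'}
--
--     def invertNum(num,n):
--         ans = ''
--         while True:
--             if num > 0:
--                 num,mod = divmod(num,n)
--                 if mod >= 10 and mod <= 15:
--                     ans = str(invertAlpha[mod]) + ans
--                 else:
--                     ans = str(mod) + ans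
--             else:
--                 break
--
--         return ans
--
--     while True:
--         if n == 16:
--             invert = hex(num)
--             invert = invert[2:].upper()
--         else:
--             invert = invertNum(num,n)
--         num += 1
--
--         # 말한 사람수를 더하기> 멤버수보다 많으면 finish-멤버수로 바꾸고 count 갱신
--         finish += len(invert)
--         answer += invert
--
--         if finish >= m and finish > 0:
--             div,mod = divmod(finish,m)
--             finish = mod
--             count += div
--         if count > t :
--             break
--
--     tube = ""
--     tubeIdx = p-1
--     while len(tube) < t :
--         tube += answer[tubeIdx]
--         tubeIdx += m
--     return tube
-- ===== SOURCE B (Python) =====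
-- DIGITS = "0123456789ABCDEF"
--
-- def solution(n, t, m, p):
--     # Never build the concatenated numeral string: walk the virtual digit
--     # stream "0" + base-n(1) + base-n(2) + ... keeping (k, start, d, power):
--     # numeral k begins at stream index `start`, has d digits, and every
--     # numeral in [k, power) with power = n**d also has d digits.
--     res = []
--     k = 0
--     start = 0
--     d = 1
--     power = n
--     for j in range(t):
--         idx = (p - 1) + j * m
--         while True:
--             if k == power:
--                 d += 1
--                 power *= n
--             elif start <= idx < start + d:
--                 break
--             else:
--                 jump = min(power - k, (idx - start) // d)
--                 k += jump
--                 start += jump * d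
--         q = idx - start
--         v = (k // n ** (d - 1 - q)) % n
--         res.append(DIGITS[v] if 0 <= v < 16 else str(v))
--     return ''.join(res)
-- ===== Notes on version B (the rewrite author's own statement) =====
-- stated objective: alternative
-- what changed: B never builds the concatenated numeral string: it keeps per-length group bookkeeping (k, start, d, power=n^d) and for each of the t target positions jumps whole runs of equal-length numerals to locate the numeral and digit position, extracting that one digit arithmetically.
-- outside the precondition, e.g. on solution(-5, 3, 2, 1): A returns '043', B returns '0-2-1'; on solution(4, 3, 2, 0): A returns '213', B returns '313'; on solution(4, 3, 2, 5): A returns '111', B returns '111'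
import Mathlib
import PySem

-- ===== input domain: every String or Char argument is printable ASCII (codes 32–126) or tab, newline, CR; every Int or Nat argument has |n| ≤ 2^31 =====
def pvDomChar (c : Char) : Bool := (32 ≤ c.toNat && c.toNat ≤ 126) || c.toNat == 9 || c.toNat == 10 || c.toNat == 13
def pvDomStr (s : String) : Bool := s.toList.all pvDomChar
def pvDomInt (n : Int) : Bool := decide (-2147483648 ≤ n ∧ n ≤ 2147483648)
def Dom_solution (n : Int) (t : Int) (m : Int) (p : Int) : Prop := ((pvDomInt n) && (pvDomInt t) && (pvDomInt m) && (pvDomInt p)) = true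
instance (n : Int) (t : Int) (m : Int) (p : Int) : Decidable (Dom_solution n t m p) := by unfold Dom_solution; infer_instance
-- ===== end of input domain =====

-- B never builds the concatenated numeral string: per-length-group jumps locate each
-- spoken digit arithmetically (an alternative algorithm); equality is proved on the
-- inputs admitted by Pre_solution below.

-- ===== PORT A =====

-- str(invertAlpha[mod]) if 10 <= mod <= 15 else str(mod)
def digitsOfA (mod : Int) : List Char :=
  if 10 ≤ mod ∧ mod ≤ 15 then
    [if mod = 10 then 'A' else if mod = 11 then 'B' else if mod = 12 then 'C'
     else if mod = 13 then 'D' else if mod = 14 then 'E' else 'F']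
  else (PySem.Int.toChars mod)

-- the 'while True' loop of invertNum; fuel num.toNat+1 suffices: num //= n shrinks (2 ≤ n)
def invertNumA (n : Int) : Nat → Int → List Char → List Char
  | 0, _, ans => ans
  | f + 1, num, ans =>
    if num > 0 then
      invertNumA n f (PySem.Int.floordiv num n)
        (digitsOfA (PySem.Int.mod num n) ++ ans)
    else ans

def hexDigitChars : List Char :=
  ['0','1','2','3','4','5','6','7','8','9','a','b','c','d','e','f']

-- the digits of hex(num) after '0x' (lowercase); exact for num ≥ 1 (A only calls it so)
def hexReprA : Nat → Int → List Char → List Char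
  | 0, _, acc => acc
  | f + 1, num, acc =>
    if num > 0 then
      hexReprA f (PySem.Int.floordiv num 16)
        (hexDigitChars.getD (PySem.Int.mod num 16).toNat '?' :: acc)
    else acc

-- one iteration's `invert` string: hex(num)[2:].upper() when n == 16, else invertNum(num, n)
def invertOfA (n num : Int) : List Char :=
  if n = 16 then
    ((('0' :: 'x' :: hexReprA (num.toNat + 1) num []).drop 2).map Char.toUpper)
  else invertNumA n (num.toNat + 1) num []

-- the outer 'while True' loop; fuel ((t+1)*m).toNat + 2 suffices inside Pre_ (proved below)
def loopA (n t m : Int) : Nat → Int → Int → Int → List Char → List Char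
  | 0, _, _, _, answer => answer
  | f + 1, count, finish, num, answer =>
    let invert := invertOfA n num
    let finish1 := finish + (invert.length : Int)
    let answer1 := answer ++ invert
    let st :=
      if finish1 ≥ m ∧ finish1 > 0 then
        (count + PySem.Int.floordiv finish1 m, PySem.Int.mod finish1 m)
      else (count, finish1)
    if st.1 > t then answer1 else loopA n t m f st.1 st.2 (num + 1) answer1

-- 'while len(tube) < t': each pass appends one char, so t.toNat passes; none = IndexError (excluded by Pre_)
def tubeA (answer : List Char) (m : Int) : Nat → List Char → Int → List Char
  | 0, tube, _ => tube
  | f + 1, tube, idx =>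
    match PySem.List.pyGet? answer idx with
    | none => tube
    | some c => tubeA answer m f (tube ++ [c]) (idx + m)

def solution (n : Int) (t : Int) (m : Int) (p : Int) : String :=
  let answer := loopA n t m (((t + 1) * m).toNat + 2) 0 0 1 ['0']
  String.ofList (tubeA answer m t.toNat [] (p - 1))

-- ===== PORT B =====

def bDigits : List Char :=
  ['0','1','2','3','4','5','6','7','8','9','A','B','C','D','E','F']

-- Source B's inner 'while True': group-advance / window test / jump; fuel 2*idx.toNat+4
-- suffices inside Pre_ (proved below)
def findB (n : Int) : Nat → Int → Int × Int × Int × Int → Int × Int × Int × Int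
  | 0, _, st => st
  | f + 1, idx, (k, start, d, power) =>
    if k = power then findB n f idx (k, start, d + 1, power * n)
    else if start ≤ idx ∧ idx < start + d then (k, start, d, power)
    else
      let jump := min (power - k) (PySem.Int.floordiv (idx - start) d)
      findB n f idx (k + jump, start + jump * d, d, power)

-- one pass of Source B's 'for j in range(t)' body; DIGITS[..] via getD (in range inside Pre_),
-- n ** (d-1-q) via ^ on the nonneg exponent (nonneg inside Pre_)
def stepB (n m p : Int) (st : List Char × Int × Int × Int × Int) (j : Int) :
    List Char × Int × Int × Int × Int :=
  let (res, k, start, d, power) := st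
  let idx := (p - 1) + j * m
  let (k', start', d', power') := findB n (2 * idx.toNat + 4) idx (k, start, d, power)
  let q := idx - start'
  let v := PySem.Int.mod (PySem.Int.floordiv k' (n ^ (d' - 1 - q).toNat)) n
  (res ++ (if 0 ≤ v ∧ v < 16 then [bDigits.getD v.toNat '?'] else PySem.Int.toChars v),
    k', start', d', power')

def solution_alt (n : Int) (t : Int) (m : Int) (p : Int) : String :=
  String.ofList ((PySem.List.pyRange 0 t 1).foldl (stepB n m p) ([], 0, 0, 1, n)).1

-- ===== PRECONDITION & SPEC =====
-- Pre_ needs m ≥ 1 (m = 0 is a ZeroDivisionError, m < 0 can diverge) and, for t ≤ 0,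
-- only n ∉ {0, 1} (n = 0 raises, n = 1 diverges; A returns "" for every other n); for
-- t ≥ 1 it is the problem's domain: base 2..16 (n > 16 and n < 0 print multi-character
-- or negative 'digits'), 1 ≤ p (p ≤ 0 reads by Python negative-index wraparound) and
-- p ≤ 2*m (beyond that whether A raises IndexError depends on how far the concatenation
-- happened to run).
def Pre_solution (n : Int) (t : Int) (m : Int) (p : Int) : Prop :=
  1 ≤ m ∧ ((t ≤ 0 ∧ n ≠ 0 ∧ n ≠ 1) ∨ (1 ≤ t ∧ 2 ≤ n ∧ n ≤ 16 ∧ 1 ≤ p ∧ p ≤ 2 * m))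
instance (n : Int) (t : Int) (m : Int) (p : Int) : Decidable (Pre_solution n t m p) := by
  unfold Pre_solution; infer_instance

def pvWitness_solution : Int × Int × Int × Int := (2, 4, 2, 1)

def Spec_solution (n : Int) (t : Int) (m : Int) (p : Int) (out : String) : Prop := out = solution_alt n t m p
instance (n : Int) (t : Int) (m : Int) (p : Int) (out : String) : Decidable (Spec_solution n t m p out) := by unfold Spec_solution; infer_instance

-- ===== CLAIM (what is proved, stated in full; the proofs are below) =====
def Claim_equal_solution : Prop := ∀ (n : Int) (t : Int) (m : Int) (p : Int), Dom_solution n t m p → Pre_solution n t m p → Spec_solution n t m p (solution n t m p)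

-- ===== LEMMAS AND PROOFS =====

-- big-endian base-nn digit list of k (empty for k = 0 or nn < 2)
def reprL (nn : Nat) (k : Nat) : List Char :=
  if _h : k = 0 ∨ nn < 2 then []
  else reprL nn (k / nn) ++ [bDigits.getD (k % nn) '?']
termination_by k
decreasing_by exact Nat.div_lt_self (by omega) (by omega)

-- the numeral spoken at slot k of the game (slot 0 is the leading '0')
def numR (nn : Nat) (k : Nat) : List Char :=
  if k = 0 ∨ nn < 2 then ['0'] else reprL nn k

theorem reprL_ne_nil {nn k : Nat} (h2 : 2 ≤ nn) (hk : 1 ≤ k) : reprL nn k ≠ [] := by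
  rw [reprL, dif_neg (by omega)]; simp

theorem numR_len_pos (nn k : Nat) : 0 < (numR nn k).length := by
  unfold numR
  split
  · simp
  · rename_i h
    rw [reprL, dif_neg h]
    simp

-- the idx-th character of the infinite stream numR k ++ numR (k+1) ++ …
def strAux (nn : Nat) (k : Nat) (idx : Nat) : Char :=
  if idx < (numR nn k).length then (numR nn k).getD idx '?'
  else strAux nn (k + 1) (idx - (numR nn k).length)
termination_by idx
decreasing_by
  have := numR_len_pos nn k
  omega

theorem numR_eq_reprL {nn k : Nat} (h2 : 2 ≤ nn) (hk : 1 ≤ k) : numR nn k = reprL nn k := by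
  rw [numR, if_neg (by omega)]

-- ---------- A side: the per-numeral strings ----------

theorem digitsOfA_eq (mod : Int) (h0 : 0 ≤ mod) (h15 : mod ≤ 15) :
    digitsOfA mod = [bDigits.getD mod.toNat '?'] := by
  interval_cases mod <;> decide

theorem invertNumA_eq (nn : Nat) (h2 : 2 ≤ nn) (h16 : nn ≤ 16) :
    ∀ (k f : Nat) (acc : List Char), k < f →
      invertNumA (nn : Int) f (k : Int) acc = reprL nn k ++ acc := by
  intro k
  induction k using Nat.strong_induction_on with
  | _ k ih =>
    intro f acc hf
    obtain ⟨f, rfl⟩ : ∃ f', f = f' + 1 := ⟨f - 1, by omega⟩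
    rw [invertNumA]
    by_cases hk : k = 0
    · subst hk
      rw [if_neg (by simp), reprL, dif_pos (by omega)]
      simp
    · have hdiv : k / nn < k := Nat.div_lt_self (by omega) (by omega)
      rw [if_pos (by exact_mod_cast Nat.pos_of_ne_zero hk),
        PySem.Int.floordiv_natCast, PySem.Int.mod_natCast,
        digitsOfA_eq _ (by positivity) (by
          have := Nat.mod_lt k (y := nn) (by omega)
          exact_mod_cast Nat.le_of_lt_succ (by omega)), Int.toNat_natCast,
        ih (k / nn) hdiv f _ (by omega)]
      conv_rhs => rw [reprL, dif_neg (by omega)]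
      simp

def lowRepr (k : Nat) : List Char :=
  if _h : k = 0 then [] else lowRepr (k / 16) ++ [hexDigitChars.getD (k % 16) '?']
termination_by k
decreasing_by exact Nat.div_lt_self (by omega) (by omega)

theorem hexReprA_eq : ∀ (k f : Nat) (acc : List Char), k < f →
    hexReprA f (k : Int) acc = lowRepr k ++ acc := by
  intro k
  induction k using Nat.strong_induction_on with
  | _ k ih =>
    intro f acc hf
    obtain ⟨f, rfl⟩ : ∃ f', f = f' + 1 := ⟨f - 1, by omega⟩
    rw [hexReprA]
    by_cases hk : k = 0
    · subst hk
      rw [if_neg (by simp), lowRepr, dif_pos rfl]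
      simp
    · have hdiv : k / 16 < k := Nat.div_lt_self (by omega) (by omega)
      have h16 : ((16 : Nat) : Int) = (16 : Int) := by norm_num
      rw [if_pos (by exact_mod_cast Nat.pos_of_ne_zero hk), ← h16,
        PySem.Int.floordiv_natCast, PySem.Int.mod_natCast, Int.toNat_natCast,
        ih (k / 16) hdiv f _ (by omega)]
      conv_rhs => rw [lowRepr, dif_neg hk]
      simp

theorem lowRepr_upper : ∀ k : Nat, (lowRepr k).map Char.toUpper = reprL 16 k := by
  intro k
  induction k using Nat.strong_induction_on with
  | _ k ih =>
    by_cases hk : k = 0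
    · subst hk; rw [lowRepr, dif_pos rfl, reprL, dif_pos (by omega)]; rfl
    · have hdiv : k / 16 < k := Nat.div_lt_self (by omega) (by omega)
      rw [lowRepr, dif_neg hk, reprL, dif_neg (by omega), List.map_append,
        ih (k / 16) hdiv]
      have hm : k % 16 < 16 := Nat.mod_lt _ (by omega)
      congr 1
      set r := k % 16 with hr
      interval_cases r <;> rfl

theorem invertOfA_eq (nn : Nat) (h2 : 2 ≤ nn) (h16 : nn ≤ 16) (k : Nat) (hk : 1 ≤ k) :
    invertOfA (nn : Int) (k : Int) = reprL nn k := by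
  unfold invertOfA
  by_cases h : nn = 16
  · subst h
    rw [if_pos (by norm_num), hexReprA_eq k _ [] (by omega)]
    simpa using lowRepr_upper k
  · rw [if_neg (by exact_mod_cast h), invertNumA_eq nn h2 h16 k _ [] (by omega)]
    simp

-- ---------- A side: the outer loop builds the stream ----------

theorem loopA_spec (nn : Nat) (h2 : 2 ≤ nn) (h16 : nn ≤ 16) (t m : Int) (hm : 1 ≤ m) :
    ∀ (f : Nat) (count finish : Int) (k0 : Nat) (ans : List Char),
      1 ≤ k0 → 0 ≤ finish → 0 ≤ count →
      count * m + finish + 1 ≤ (ans.length : Int) →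
      (t + 1) * m - (count * m + finish) < (f : Int) →
      ∃ c : Nat,
        loopA (nn : Int) t m f count finish (k0 : Int) ans
            = ans ++ (List.range' k0 c).flatMap (reprL nn)
          ∧ (t + 1) * m + 1 ≤ ((ans ++ (List.range' k0 c).flatMap (reprL nn)).length : Int) := by
  intro f
  induction f with
  | zero =>
    intro count finish k0 ans _ _ _ hinv hfuel
    refine ⟨0, by simp [loopA], ?_⟩
    simp only [List.range'_zero, List.flatMap_nil, List.append_nil]
    push_cast at hfuel ⊢
    linarith
  | succ f ih =>
    intro count finish k0 ans hk0 hf0 hc0 hinv hfuel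
    rw [loopA]
    have hio := invertOfA_eq nn h2 h16 k0 hk0
    rw [hio]
    have hL1 : 1 ≤ ((reprL nn k0).length : Int) := by
      have := reprL_ne_nil h2 hk0
      have : 0 < (reprL nn k0).length := List.length_pos_iff.mpr this
      exact_mod_cast this
    set L : Int := ((reprL nn k0).length : Int) with hLdef
    have key : ∀ count' finish' : Int,
        count' * m + finish' = count * m + finish + L → 0 ≤ finish' → 0 ≤ count' →
        (¬ count' > t →
          ∃ c : Nat, loopA (↑nn) t m f count' finish' ((k0 : Int) + 1) (ans ++ reprL nn k0)
              = ans ++ (List.range' k0 c.succ).flatMap (reprL nn)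
            ∧ (t + 1) * m + 1
              ≤ ((ans ++ (List.range' k0 c.succ).flatMap (reprL nn)).length : Int)) ∧
        (count' > t →
          (t + 1) * m + 1 ≤ ((ans ++ (List.range' k0 1).flatMap (reprL nn)).length : Int)) := by
      intro count' finish' hsum hfin' hcnt'
      have hinv' : count' * m + finish' + 1 ≤ (((ans ++ reprL nn k0).length : Nat) : Int) := by
        rw [List.length_append]
        push_cast
        omega
      constructor
      · intro hng
        have hcast : ((k0 : Int) + 1) = (((k0 + 1 : Nat)) : Int) := by push_cast; ring
        rw [hcast]
        obtain ⟨c, hc1, hc2⟩ := ih count' finish' (k0 + 1) (ans ++ reprL nn k0)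
          (by omega) hfin' hcnt' hinv' (by
            push_cast at hfuel ⊢
            omega)
        refine ⟨c, ?_, ?_⟩
        · rw [hc1, List.range'_succ, List.flatMap_cons, List.append_assoc]
        · rw [List.range'_succ, List.flatMap_cons]
          simpa [List.append_assoc] using hc2
      · intro hgt
        have h1 : t + 1 ≤ count' := by omega
        have h2 : (t + 1) * m ≤ count' * m :=
          mul_le_mul_of_nonneg_right h1 (by omega)
        simp only [List.range'_one, List.flatMap_cons, List.flatMap_nil, List.append_nil]
        rw [List.length_append]
        push_cast
        push_cast at hinv'
        omega
    by_cases hbr : finish + (((reprL nn k0).length : Nat) : Int) ≥ m ∧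
        finish + (((reprL nn k0).length : Nat) : Int) > 0
    · rw [if_pos hbr]
      set fin1 : Int := finish + (((reprL nn k0).length : Nat) : Int) with hfin1
      have hmpos : (0 : Int) < m := by omega
      have hdm : PySem.Int.floordiv fin1 m * m + PySem.Int.mod fin1 m = fin1 :=
        PySem.Int.floordiv_mul_add_mod fin1 m
      have hmod0 : 0 ≤ PySem.Int.mod fin1 m := by
        rw [PySem.Int.mod_eq_emod_of_pos hmpos]
        exact Int.emod_nonneg _ (by omega)
      have hdiv0 : 0 ≤ PySem.Int.floordiv fin1 m := by
        rw [PySem.Int.floordiv_eq_ediv_of_pos hmpos]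
        exact Int.ediv_nonneg (by omega) (by omega)
      have hsum : (count + PySem.Int.floordiv fin1 m) * m + PySem.Int.mod fin1 m
          = count * m + finish + L := by
        rw [add_mul]
        rw [hLdef]
        omega
      obtain ⟨knot, kyes⟩ := key (count + PySem.Int.floordiv fin1 m)
        (PySem.Int.mod fin1 m) hsum hmod0 (by omega)
      by_cases hstop : count + PySem.Int.floordiv fin1 m > t
      · rw [if_pos hstop]
        refine ⟨1, ?_, kyes hstop⟩
        simp [List.range'_one]
      · rw [if_neg hstop]
        obtain ⟨c, hc1, hc2⟩ := knot hstop
        exact ⟨c + 1, hc1, hc2⟩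
    · rw [if_neg hbr]
      set fin1 : Int := finish + (((reprL nn k0).length : Nat) : Int) with hfin1
      have hsum : count * m + fin1 = count * m + finish + L := by rw [hLdef]; omega
      obtain ⟨knot, kyes⟩ := key count fin1 hsum (by omega) hc0
      by_cases hstop : count > t
      · rw [if_pos hstop]
        refine ⟨1, ?_, kyes hstop⟩
        simp [List.range'_one]
      · rw [if_neg hstop]
        obtain ⟨c, hc1, hc2⟩ := knot hstop
        exact ⟨c + 1, hc1, hc2⟩

theorem answer_spec (nn : Nat) (h2 : 2 ≤ nn) (h16 : nn ≤ 16) (t m : Int) (hm : 1 ≤ m) :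
    ∃ c : Nat,
      loopA (nn : Int) t m (((t + 1) * m).toNat + 2) 0 0 1 ['0']
          = (List.range' 0 (c + 1)).flatMap (numR nn)
        ∧ (t + 1) * m + 1 ≤ (((List.range' 0 (c + 1)).flatMap (numR nn)).length : Int) := by
  have h01 : ((1 : Nat) : Int) = (1 : Int) := by norm_num
  obtain ⟨c, hc1, hc2⟩ := loopA_spec nn h2 h16 t m hm (((t + 1) * m).toNat + 2) 0 0 1 ['0']
    (by omega) le_rfl le_rfl (by simp)
    (by
      have := Int.self_le_toNat ((t + 1) * m)
      push_cast
      omega)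
  have hrw : ['0'] ++ (List.range' 1 c).flatMap (reprL nn)
      = (List.range' 0 (c + 1)).flatMap (numR nn) := by
    rw [List.range'_succ, List.flatMap_cons]
    have h0 : numR nn 0 = ['0'] := by simp [numR]
    rw [h0]
    congr 1
    rw [List.flatMap, List.flatMap]
    congr 1
    refine List.map_congr_left ?_
    intro i hi
    have : 1 ≤ i := (List.mem_range'_1.mp hi).1
    exact (numR_eq_reprL h2 this).symm
  rw [h01] at hc1
  exact ⟨c, by rw [hc1, hrw], by rw [← hrw]; exact hc2⟩

-- ---------- stream indexing ----------

theorem flat_getD (nn : Nat) :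
    ∀ (c a idx : Nat), idx < ((List.range' a c).flatMap (numR nn)).length →
      ((List.range' a c).flatMap (numR nn)).getD idx '?' = strAux nn a idx := by
  intro c
  induction c with
  | zero => intro a idx h; simp at h
  | succ c ih =>
    intro a idx h
    rw [List.range'_succ, List.flatMap_cons] at h ⊢
    rw [strAux]
    by_cases hlt : idx < (numR nn a).length
    · rw [if_pos hlt, List.getD_append _ _ _ _ hlt]
    · rw [List.length_append] at h
      rw [if_neg hlt, ← ih (a + 1) (idx - (numR nn a).length) (by omega)]
      rw [List.getD_eq_getElem?_getD, List.getD_eq_getElem?_getD,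
        List.getElem?_append_right (by omega)]

theorem tubeA_eq (answer : List Char) (m : Int) :
    ∀ (f : Nat) (tube : List Char) (idx : Int), 0 ≤ idx → 1 ≤ m →
      (∀ i : Nat, i < f → idx + (i : Int) * m < (answer.length : Int)) →
      tubeA answer m f tube idx
        = tube ++ (List.range f).map (fun (i : Nat) => answer.getD (idx + (i : Int) * m).toNat '?') := by
  intro f
  induction f with
  | zero => intro tube idx _ _ _; simp [tubeA]
  | succ f ih =>
    intro tube idx h0 hm hb
    have hidx : idx < (answer.length : Int) := by
      have := hb 0 (by omega)
      simpa using this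
    rw [tubeA, PySem.List.pyGet?_eq_some_getElem answer h0 hidx]
    dsimp only
    rw [ih (tube ++ [answer[idx.toNat]]) (idx + m) (by omega) hm (fun i hi => by
      have := hb (i + 1) (by omega)
      push_cast at this ⊢
      linarith [this])]
    rw [List.range_succ_eq_map, List.map_cons, List.map_map, List.append_assoc]
    congr 1
    rw [List.cons_append, List.nil_append]
    congr 1
    · rw [List.getD_eq_getElem _ _ (by
        simp
        omega)]
      congr 1
      omega
    · refine List.map_congr_left ?_
      intro i _
      simp only [Function.comp_apply]
      congr 2
      push_cast
      ring

-- ---------- B side ----------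

def cumLen (nn k : Nat) : Nat := ((List.range k).map (fun j => (numR nn j).length)).sum

theorem cumLen_succ (nn k : Nat) : cumLen nn (k + 1) = cumLen nn k + (numR nn k).length := by
  simp [cumLen, List.range_succ]

theorem strAux_skip (nn : Nat) :
    ∀ (k idx : Nat), cumLen nn k ≤ idx →
      strAux nn 0 idx = strAux nn k (idx - cumLen nn k) := by
  intro k
  induction k with
  | zero => intro idx _; simp [cumLen]
  | succ k ih =>
    intro idx h
    rw [cumLen_succ] at h ⊢
    have hlen := numR_len_pos nn k
    rw [ih idx (by omega)]
    rw [strAux, if_neg (by omega)]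
    congr 1
    omega

theorem reprL_length (nn : Nat) (h2 : 2 ≤ nn) :
    ∀ (d k : Nat), 1 ≤ d → nn ^ (d - 1) ≤ k → k < nn ^ d →
      (reprL nn k).length = d := by
  intro d
  induction d with
  | zero => omega
  | succ d ih =>
    intro k hd hlo hhi
    by_cases hd1 : d = 0
    · subst hd1
      have hlo' : 1 ≤ k := by simpa using hlo
      have hhi' : k < nn := by simpa using hhi
      rw [reprL, dif_neg (by omega), List.length_append]
      rw [reprL, dif_pos (Or.inl (Nat.div_eq_of_lt hhi'))]
      rfl
    · have hk1 : 1 ≤ k := le_trans (Nat.one_le_pow _ _ (by omega)) hlo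
      rw [reprL, dif_neg (by omega), List.length_append]
      have hlo' : nn ^ (d - 1) ≤ k / nn := by
        rw [Nat.le_div_iff_mul_le (by omega)]
        calc nn ^ (d - 1) * nn = nn ^ d := by
              rw [← pow_succ]; congr 1; omega
          _ ≤ k := by simpa using hlo
      have hhi' : k / nn < nn ^ d := by
        rw [Nat.div_lt_iff_lt_mul (by omega)]
        calc k < nn ^ (d + 1) := hhi
          _ = nn ^ d * nn := by rw [pow_succ]
      rw [ih (k / nn) (by omega) hlo' hhi']
      rfl


theorem numR_length (nn : Nat) (h2 : 2 ≤ nn) (d k : Nat) (hd : 1 ≤ d)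
    (hlo : d = 1 ∨ nn ^ (d - 1) ≤ k) (hhi : k < nn ^ d) :
    (numR nn k).length = d := by
  by_cases hk : k = 0
  · subst hk
    rcases hlo with h1 | h1
    · subst h1; simp [numR]
    · exfalso
      have := Nat.one_le_pow (d - 1) nn (by omega)
      omega
  · rw [numR_eq_reprL h2 (by omega)]
    rcases hlo with h1 | h1
    · subst h1
      exact reprL_length nn h2 1 k (by omega) (by simpa using Nat.pos_of_ne_zero hk) (by simpa using hhi)
    · exact reprL_length nn h2 d k hd h1 hhi

theorem cumLen_run (nn : Nat) (_h2 : 2 ≤ nn) (d : Nat) :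
    ∀ (j k : Nat), 1 ≤ d → (∀ i, i < j → (numR nn (k + i)).length = d) →
      cumLen nn (k + j) = cumLen nn k + j * d := by
  intro j
  induction j with
  | zero => simp
  | succ j ih =>
    intro k hd h
    have : k + (j + 1) = (k + j) + 1 := by omega
    rw [this, cumLen_succ, ih k hd (fun i hi => h i (by omega)), h j (by omega)]
    ring

theorem reprL_getD (nn : Nat) (h2 : 2 ≤ nn) :
    ∀ (k q : Nat), q < (reprL nn k).length →
      (reprL nn k).getD q '?'
        = bDigits.getD (k / nn ^ ((reprL nn k).length - 1 - q) % nn) '?' := by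
  intro k
  induction k using Nat.strong_induction_on with
  | _ k ih =>
    intro q hq
    by_cases hk : k = 0
    · subst hk; rw [reprL, dif_pos (by omega)] at hq; simp at hq
    · have hdiv : k / nn < k := Nat.div_lt_self (by omega) (by omega)
      rw [reprL, dif_neg (by omega)] at hq ⊢
      rw [List.length_append, List.length_singleton] at hq ⊢
      by_cases hq1 : q < (reprL nn (k / nn)).length
      · rw [List.getD_append _ _ _ _ hq1, ih (k / nn) hdiv q hq1]
        have heq : (k / nn) / nn ^ ((reprL nn (k / nn)).length - 1 - q)
            = k / nn ^ ((reprL nn (k / nn)).length + 1 - 1 - q) := by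
          have he : (reprL nn (k / nn)).length + 1 - 1 - q
              = ((reprL nn (k / nn)).length - 1 - q) + 1 := by omega
          rw [he, pow_succ', Nat.div_div_eq_div_mul]
        rw [heq]
      · have hq2 : q = (reprL nn (k / nn)).length := by omega
        subst hq2
        rw [List.getD_eq_getElem?_getD, List.getElem?_append_right (le_refl _)]
        simp

def GoodB (nn : Nat) (k start d power : Int) : Prop :=
  0 ≤ k ∧ 1 ≤ d ∧ power = ((nn ^ d.toNat : Nat) : Int) ∧ k ≤ power ∧
    start = (cumLen nn k.toNat : Int) ∧ (d = 1 ∨ ((nn ^ (d.toNat - 1) : Nat) : Int) ≤ k)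

theorem findB_spec (nn : Nat) (h2 : 2 ≤ nn) :
    ∀ (f : Nat) (idx k start d power : Int),
      GoodB nn k start d power → start ≤ idx →
      2 * (idx + 1 - start) + (if k = power then 1 else 0) ≤ (f : Int) →
      GoodB nn (findB (nn : Int) f idx (k, start, d, power)).1
        (findB (nn : Int) f idx (k, start, d, power)).2.1
        (findB (nn : Int) f idx (k, start, d, power)).2.2.1
        (findB (nn : Int) f idx (k, start, d, power)).2.2.2
      ∧ (findB (nn : Int) f idx (k, start, d, power)).2.1 ≤ idx
      ∧ idx < (findB (nn : Int) f idx (k, start, d, power)).2.1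
              + (findB (nn : Int) f idx (k, start, d, power)).2.2.1
      ∧ (findB (nn : Int) f idx (k, start, d, power)).1
          < (findB (nn : Int) f idx (k, start, d, power)).2.2.2 := by
  intro f
  induction f with
  | zero =>
    intro idx k start d power hg hsi hfuel
    exfalso
    split_ifs at hfuel <;> (push_cast at hfuel; omega)
  | succ f ih =>
    intro idx k start d power hg hsi hfuel
    obtain ⟨hk0, hd1, hpow, hkle, hstart, hflag⟩ := hg
    have hp1 : (1 : Int) ≤ power := by
      rw [hpow]
      exact_mod_cast Nat.one_le_pow _ _ (by omega)
    have hnn2 : (2 : Int) ≤ (nn : Int) := by exact_mod_cast h2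
    rw [findB]
    by_cases hkp : k = power
    · rw [if_pos hkp]
      have hdt : (d + 1).toNat = d.toNat + 1 := by omega
      have hlt : k < power * (nn : Int) := by
        rw [hkp]
        nlinarith
    
      apply ih
      · refine ⟨hk0, by omega, ?_, by nlinarith, hstart, Or.inr ?_⟩
        · rw [hdt, pow_succ, hpow]
          push_cast
          ring
        · rw [hdt]
          simp only [Nat.add_sub_cancel]
          rw [← hpow, hkp]
      · exact hsi
      · rw [if_neg (by omega)]
        rw [if_pos hkp] at hfuel
        push_cast at hfuel ⊢
        omega
    · rw [if_neg hkp]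
      by_cases hwin : start ≤ idx ∧ idx < start + d
      · rw [if_pos hwin]
        exact ⟨⟨hk0, hd1, hpow, hkle, hstart, hflag⟩, hwin.1, hwin.2, by show k < power; omega⟩
      · rw [if_neg hwin]
        have hd0 : (0 : Int) < d := by omega
        have hge : start + d ≤ idx := by
          rcases not_and_or.mp hwin with h | h
          · omega
          · omega
        set jump := min (power - k) (PySem.Int.floordiv (idx - start) d) with hjdef
        have hfd1 : 1 ≤ PySem.Int.floordiv (idx - start) d := by
          rw [PySem.Int.le_floordiv_iff_mul_le hd0]
          omega
        have hj1 : 1 ≤ jump := le_min (by omega) hfd1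
        have hjd : jump * d ≤ idx - start := by
          have h1 : jump ≤ PySem.Int.floordiv (idx - start) d := min_le_right _ _
          rw [← PySem.Int.le_floordiv_iff_mul_le hd0]
          exact h1
        have hjp : jump ≤ power - k := min_le_left _ _
        have hjc : ((jump.toNat : Nat) : Int) = jump := Int.toNat_of_nonneg (by omega)
        have hdc : ((d.toNat : Nat) : Int) = d := Int.toNat_of_nonneg (by omega)
        have hjdc : ((jump.toNat * d.toNat : Nat) : Int) = jump * d := by
          push_cast
          rw [hjc, hdc]
        have hjd1 : (1 : Int) ≤ jump * d := by nlinarith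
        -- every numeral in [k, k+jump) has d.toNat digits
        have hrun : cumLen nn (k.toNat + jump.toNat)
            = cumLen nn k.toNat + jump.toNat * d.toNat := by
          apply cumLen_run nn h2 d.toNat jump.toNat k.toNat (by omega)
          intro i hi
          apply numR_length nn h2 d.toNat _ (by omega)
          · rcases hflag with h1 | h1
            · left; omega
            · right; omega
          · omega
        apply ih
        · refine ⟨by omega, hd1, hpow, by omega, ?_, ?_⟩
          · rw [hstart]
            have h1 : (k + jump).toNat = k.toNat + jump.toNat := by omega
            rw [h1, hrun]
            omega
          · rcases hflag with h1 | h1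
            · exact Or.inl h1
            · exact Or.inr (by omega)
        · omega
        · rw [if_neg hkp] at hfuel
          split_ifs <;> omega

theorem stepB_char (nn : Nat) (h2 : 2 ≤ nn) (k start d power idx : Int)
    (hg : GoodB nn k start d power) (hs : start ≤ idx) (hw : idx < start + d)
    (hkp : k < power) (n : Int) (hn : n = (nn : Int)) (h16 : nn ≤ 16) :
    (if 0 ≤ PySem.Int.mod (PySem.Int.floordiv k (n ^ (d - 1 - (idx - start)).toNat)) n ∧
          PySem.Int.mod (PySem.Int.floordiv k (n ^ (d - 1 - (idx - start)).toNat)) n < 16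
        then [bDigits.getD
          (PySem.Int.mod (PySem.Int.floordiv k (n ^ (d - 1 - (idx - start)).toNat)) n).toNat '?']
        else PySem.Int.toChars
          (PySem.Int.mod (PySem.Int.floordiv k (n ^ (d - 1 - (idx - start)).toNat)) n))
      = [strAux nn k.toNat (idx - start).toNat] := by
  obtain ⟨hk0, hd1, hpow, hkle, hstart, hflag⟩ := hg
  have hlen : (numR nn k.toNat).length = d.toNat := by
    apply numR_length nn h2 d.toNat k.toNat (by omega)
    · rcases hflag with h1 | h1
      · left; omega
      · right; omega
    · omega
  have hq0 : 0 ≤ idx - start := by omega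
  have hqd : (idx - start).toNat < d.toNat := by omega
  subst hn
  have hne : (nn : Int) ^ (d - 1 - (idx - start)).toNat
      = ((nn ^ (d - 1 - (idx - start)).toNat : Nat) : Int) := by push_cast; ring
  have hkc : k = ((k.toNat : Nat) : Int) := by omega
  have hfd : PySem.Int.floordiv k (((nn ^ (d - 1 - (idx - start)).toNat : Nat)) : Int)
      = ((k.toNat / nn ^ (d - 1 - (idx - start)).toNat : Nat) : Int) := by
    conv_lhs => rw [hkc]
    exact PySem.Int.floordiv_natCast _ _
  have hmd : PySem.Int.mod ((k.toNat / nn ^ (d - 1 - (idx - start)).toNat : Nat) : Int) ((nn : Nat) : Int)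
      = ((k.toNat / nn ^ (d - 1 - (idx - start)).toNat % nn : Nat) : Int) :=
    PySem.Int.mod_natCast _ _
  rw [hne, hfd, hmd]
  have hdig : k.toNat / nn ^ (d - 1 - (idx - start)).toNat % nn < 16 := by
    have := Nat.mod_lt (k.toNat / nn ^ (d - 1 - (idx - start)).toNat) (y := nn) (by omega)
    omega
  rw [if_pos ⟨by positivity, by exact_mod_cast hdig⟩, Int.toNat_natCast]
  congr 1
  rw [strAux, if_pos (by omega)]
  by_cases hk : k.toNat = 0
  · have hdz : d = 1 := by
      rcases hflag with h1 | h1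
      · exact h1
      · exfalso
        have h3 := Nat.one_le_pow (d.toNat - 1) nn (by omega)
        omega
    subst hdz
    have hq : (idx - start).toNat = 0 := by omega
    rw [hk, hq]
    simp [numR]
    rfl
  · rw [numR, if_neg (by omega)] at hlen ⊢
    rw [reprL_getD nn h2 k.toNat (idx - start).toNat (by omega), hlen]
    have hexp : (d - 1 - (idx - start)).toNat = d.toNat - 1 - (idx - start).toNat := by omega
    rw [hexp]

theorem foldB_spec (nn : Nat) (h2 : 2 ≤ nn) (h16 : nn ≤ 16) (m p : Int) (hm : 1 ≤ m) (_hp : 1 ≤ p) :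
    ∀ (cnt j0 : Nat) (res : List Char) (k start d power : Int),
      GoodB nn k start d power → start ≤ (p - 1) + (j0 : Int) * m →
      ((((List.range' j0 cnt).map (fun (i : Nat) => (i : Int))).foldl (stepB (nn : Int) m p)
          (res, k, start, d, power)).1 : List Char)
        = res ++ (List.range' j0 cnt).map
            (fun (i : Nat) => strAux nn 0 ((p - 1) + (i : Int) * m).toNat) := by
  intro cnt
  induction cnt with
  | zero => intro j0 res k start d power _ _; simp
  | succ cnt ih =>
    intro j0 res k start d power hg hle
    rw [List.range'_succ, List.map_cons, List.foldl_cons, List.map_cons]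
    have hs0 : (0 : Int) ≤ start := by
      obtain ⟨_, _, _, _, hstart, _⟩ := hg
      rw [hstart]
      positivity
    have hidx0 : (0 : Int) ≤ (p - 1) + (j0 : Int) * m := by
      have : (0 : Int) ≤ (j0 : Int) * m := mul_nonneg (by positivity) (by omega)
      omega
    have hfuel : 2 * (((p - 1) + (j0 : Int) * m) + 1 - start) + (if k = power then 1 else 0)
        ≤ ((2 * ((p - 1) + (j0 : Int) * m).toNat + 4 : Nat) : Int) := by
      split_ifs <;> (push_cast; omega)
    obtain ⟨hg', hs', hw', hkp'⟩ :=
      findB_spec nn h2 (2 * ((p - 1) + (j0 : Int) * m).toNat + 4)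
        ((p - 1) + (j0 : Int) * m) k start d power hg hle hfuel
    rcases hF : findB (nn : Int) (2 * ((p - 1) + (j0 : Int) * m).toNat + 4)
        ((p - 1) + (j0 : Int) * m) (k, start, d, power) with ⟨k', s', d', p'⟩
    rw [hF] at hg' hs' hw' hkp'
    simp only at hg' hs' hw' hkp'
    have hchar := stepB_char nn h2 k' s' d' p' ((p - 1) + (j0 : Int) * m)
      hg' hs' hw' hkp' (nn : Int) rfl h16
    have hscast : s' = ((cumLen nn k'.toNat : Nat) : Int) := hg'.2.2.2.2.1
    have hskip : strAux nn 0 ((p - 1) + (j0 : Int) * m).toNat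
        = strAux nn k'.toNat ((((p - 1) + (j0 : Int) * m)) - s').toNat := by
      rw [strAux_skip nn k'.toNat ((p - 1) + (j0 : Int) * m).toNat (by omega)]
      congr 1
      omega
    have hstep : stepB (nn : Int) m p (res, k, start, d, power) ((j0 : Nat) : Int)
        = (res ++ [strAux nn 0 ((p - 1) + (j0 : Int) * m).toNat], k', s', d', p') := by
      simp only [stepB, hF]
      rw [hchar, ← hskip]
    rw [hstep]
    rw [ih (j0 + 1) (res ++ [strAux nn 0 ((p - 1) + (j0 : Int) * m).toNat]) k' s' d' p' hg'
      (by
        have hmm : (j0 : Int) * m + m = (((j0 + 1 : Nat)) : Int) * m := by push_cast; ring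
        omega)]
    simp [List.append_assoc]

-- ===== VERDICT (by name: the statement is the Claim_ definition above) =====
theorem solution_spec : Claim_equal_solution := by
  intro n t m p _hdom hpre
  obtain ⟨hm, hrest⟩ := hpre
  unfold Spec_solution
  rcases hrest with ⟨ht, -, -⟩ | ⟨ht1, hn2, hn16, hp1, hpm⟩
  · -- t ≤ 0: A's extraction loop runs 0 times, B's range is empty
    have ht0 : t.toNat = 0 := by omega
    simp [solution, solution_alt, ht0, tubeA, PySem.List.pyRange_one]
  · have hncast : ((n.toNat : Nat) : Int) = n := Int.toNat_of_nonneg (by omega)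
    set nn := n.toNat with hnn
    have h2 : 2 ≤ nn := by omega
    have h16 : nn ≤ 16 := by omega
    rw [← hncast]
    obtain ⟨c, hansw, hlen⟩ := answer_spec nn h2 h16 t m hm
    have hb : ∀ i : Nat, i < t.toNat →
        (p - 1) + (i : Int) * m
          < ((((List.range' 0 (c + 1)).flatMap (numR nn)).length : Nat) : Int) := by
      intro i hi
      have h1 : (i : Int) ≤ t - 1 := by omega
      have h2' : (i : Int) * m ≤ (t - 1) * m := mul_le_mul_of_nonneg_right h1 (by omega)
      nlinarith [hlen]
    simp only [solution, solution_alt]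
    rw [hansw]
    rw [tubeA_eq _ m t.toNat [] (p - 1) (by omega) hm (fun i hi => hb i hi)]
    have hpr : PySem.List.pyRange 0 t 1 = (List.range' 0 t.toNat).map (fun (i : Nat) => (i : Int)) := by
      rw [PySem.List.pyRange_one 0 t, ← List.range_eq_range']
      simp
    rw [hpr]
    rw [foldB_spec nn h2 h16 m p hm hp1 t.toNat 0 [] 0 0 1 (nn : Int)
      (by
        refine ⟨le_rfl, le_rfl, ?_, by positivity, by simp [cumLen], Or.inl rfl⟩
        norm_num)
      (by
        simp
        omega)]
    rw [List.nil_append, List.nil_append]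
    apply congrArg
    simp only [← List.range_eq_range']
    refine List.map_congr_left ?_
    intro i hi
    have hi' : i < t.toNat := List.mem_range.mp hi
    have hnn0 : 0 ≤ (p - 1) + (i : Int) * m := by
      have : (0 : Int) ≤ (i : Int) * m := mul_nonneg (by positivity) (by omega)
      omega
    rw [List.range_eq_range']
    exact flat_getD nn (c + 1) 0 ((p - 1) + (i : Int) * m).toNat (by
      have := hb i hi'
      omega)
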